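-- pv_equiv track=rewrite | github.com/dnwls16071/PS_Baekjoon | 10000~/14905.py | func
-- ===== SOURCE A (Python) =====
-- def func(x):
--     if x < 8:
--         return "Impossible."
--     else:
--         prime = []
--         sieve = [True] * (x+1)
--         sieve[0] = False
--         sieve[1] = False
--         for i in range(2, x+1):
--             if sieve[i]:
--                 prime.append(i)
--                 for j in range(i*i, x+1, i):
--                     sieve[j] = False
--
--         flag = False
--         for a in prime:
--             if flag:
--                 break
--             for b in prime:
--                 if flag:
--                     break
--                 for c in prime:
--                     if flag:
--                         break
--                     for d in prime:
--                         if a + b + c + d > x: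
--                             break
--                         if a + b + c + d == x:
--                             ans = f"{a} {b} {c} {d}"
--                             flag = True
--                             break
--         return ans
-- ===== SOURCE B (Python) =====
-- def func(x):
--     if x < 8:
--         return "Impossible."
--     else:
--         prime = []
--         sieve = [True] * (x+1)
--         sieve[0] = False
--         sieve[1] = False
--         for i in range(2, x+1):
--             if sieve[i]:
--                 prime.append(i)
--                 for j in range(i*i, x+1, i):
--                     sieve[j] = False
--
--         primeset = set(prime)
--
--         # depth-first search for the lexicographically smallest list of j primes
--         # summing to rem; each remaining slot needs at least 2, which prunes the scan
--         def gen(j, rem):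
--             if j == 1:
--                 return [rem] if rem in primeset else None
--             for p in prime:
--                 if p > rem - 2 * (j - 1):
--                     break
--                 rest = gen(j - 1, rem - p)
--                 if rest is not None:
--                     return [p] + rest
--             return None
--
--         g = gen(4, x)
--         if g is not None:
--             return " ".join(map(str, g))
-- ===== Notes on version B (the rewrite author's own statement) =====
-- stated objective: alternative
-- what changed: Replaces A's four hard-coded nested prime loops (whose innermost loop linearly scans primes for d) by a recursive depth-first k-sum search with a uniform 'each remaining slot needs >= 2' pruning bound and an O(1) set-membership test for the last slot.
import Mathlib
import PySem

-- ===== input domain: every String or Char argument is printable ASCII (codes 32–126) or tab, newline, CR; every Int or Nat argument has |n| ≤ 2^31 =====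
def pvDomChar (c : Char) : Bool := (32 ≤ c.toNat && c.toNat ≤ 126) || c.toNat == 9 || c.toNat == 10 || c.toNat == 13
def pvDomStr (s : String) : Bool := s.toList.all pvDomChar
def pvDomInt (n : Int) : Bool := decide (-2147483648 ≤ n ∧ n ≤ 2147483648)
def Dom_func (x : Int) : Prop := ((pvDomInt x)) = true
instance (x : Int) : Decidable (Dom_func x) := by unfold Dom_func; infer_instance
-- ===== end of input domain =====

-- B replaces A's four hard-coded nested prime loops by a recursive depth-first k-sum search with
-- a uniform pruning bound and an O(1) set lookup for the last slot (objective: alternative algorithm).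
-- For x ≥ 8 with no four-prime decomposition A raises UnboundLocalError and B returns None
-- (not a string); no such x exists with |x| ≤ 2^31 (Goldbach is verified far beyond), so that
-- branch is dead code on Dom; both ports return "" on it.

-- ===== PORT A =====
-- the f-string f"{a} {b} {c} {d}" (identical in Source A and Source B)
def pvFmt (a b c d : Int) : String :=
  PySem.Int.toStr a ++ " " ++ PySem.Int.toStr b ++ " " ++ PySem.Int.toStr c ++ " " ++ PySem.Int.toStr d

-- the sieve lines, identical in Source A and Source B; indices i, j are ≥ 0 and < x+1 on every
-- reachable state, so Array.set!/getD with .toNat is exact for Python's sieve[j] = False / sieve[i]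
def pvSieveStep (x : Int) (st : List Int × Array Bool) (i : Int) : List Int × Array Bool :=
  if st.2.getD i.toNat false then
    (st.1 ++ [i], (PySem.List.pyRange (i*i) (x+1) i).foldl (fun sv j => sv.set! j.toNat false) st.2)
  else st

def pvPrimes (x : Int) : List Int :=
  ((PySem.List.pyRange 2 (x+1) 1).foldl (pvSieveStep x)
    ([], ((Array.replicate (x+1).toNat true).set! 0 false).set! 1 false)).1

-- A's four nested loops with the flag/break discipline: some = (flag set, ans assigned)
def pvLoopD (x a b c : Int) : List Int → Option String
  | [] => none
  | d :: ds =>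
    if a + b + c + d > x then none
    else if a + b + c + d = x then some (pvFmt a b c d)
    else pvLoopD x a b c ds

def pvLoopC (x a b : Int) (P : List Int) : List Int → Option String
  | [] => none
  | c :: cs =>
    match pvLoopD x a b c P with
    | some s => some s
    | none => pvLoopC x a b P cs

def pvLoopB (x a : Int) (P : List Int) : List Int → Option String
  | [] => none
  | b :: bs =>
    match pvLoopC x a b P P with
    | some s => some s
    | none => pvLoopB x a P bs

def pvLoopA (x : Int) (P : List Int) : List Int → Option String
  | [] => none
  | a :: as_ =>
    match pvLoopB x a P P with
    | some s => some s
    | none => pvLoopA x P as_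

def func (x : Int) : String :=
  if x < 8 then "Impossible."
  else
    match pvLoopA x (pvPrimes x) (pvPrimes x) with
    | some s => s
    | none => ""   -- Python raises UnboundLocalError here; unreachable for |x| ≤ 2^31

-- ===== PORT B =====
-- the body of gen's 'for p in prime' loop: f is the recursive call gen(j-1, rem-p),
-- bound is rem - 2*(j-1) (each remaining slot needs at least 2)
def pvGenLoop (f : Int → Option (List Int)) (bound : Int) : List Int → Option (List Int)
  | [] => none
  | p :: ps =>
    if p > bound then none
    else
      match f p with
      | some rest => some (p :: rest)
      | none => pvGenLoop f bound ps

-- gen(j, rem): lexicographically smallest list of j primes summing to rem, or None.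
-- j is 4, 3, 2, 1 on every reachable call, so Nat recursion is exact; the j = 0 case is a
-- termination guard only (Python would recurse without bound there; never reached from gen(4, x))
def pvGen (P : List Int) (pset : PySem.Set Int) : Nat → Int → Option (List Int)
  | 0, _ => none
  | 1, rem => if rem ∈ pset then some [rem] else none
  | (j+2), rem => pvGenLoop (fun p => pvGen P pset (j+1) (rem - p)) (rem - 2 * ((j:Int) + 1)) P

def func_alt (x : Int) : String :=
  if x < 8 then "Impossible."
  else
    let P := pvPrimes x
    let pset := PySem.Set.ofList P
    match pvGen P pset 4 x with
    | some g => PySem.Str.join " " (g.map PySem.Int.toStr)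
    | none => ""   -- Python B falls off and returns None here; unreachable for |x| ≤ 2^31

-- ===== PRECONDITION & SPEC =====
def Spec_func (x : Int) (out : String) : Prop := out = func_alt x
instance (x : Int) (out : String) : Decidable (Spec_func x out) := by unfold Spec_func; infer_instance

-- ===== CLAIM (what is proved, stated in full; the proofs are below) =====
def Claim_equal_func : Prop := ∀ (x : Int), Dom_func x → Spec_func x (func x)

-- ===== LEMMAS AND PROOFS =====

-- proof-only reference: first c in Q with v - c ∈ P
def pvFirstC (v : Int) (P : List Int) : List Int → Option Int
  | [] => none
  | c :: cs => if v - c ∈ P then some c else pvFirstC v P cs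

-- the prime list is a sublist of range(2, x+1): sorted, elements in [2, x]
lemma pvSieve_fold_fst (x : Int) : ∀ (L : List Int) (pr : List Int) (sv : Array Bool),
    ∃ t, t.Sublist L ∧ (L.foldl (pvSieveStep x) (pr, sv)).1 = pr ++ t := by
  intro L
  induction L with
  | nil => intro pr sv; exact ⟨[], List.Sublist.refl _, by simp⟩
  | cons i L ih =>
    intro pr sv
    simp only [List.foldl_cons]
    by_cases h : sv.getD i.toNat false
    · have hstep : pvSieveStep x (pr, sv) i =
          (pr ++ [i], (PySem.List.pyRange (i*i) (x+1) i).foldl (fun sv j => sv.set! j.toNat false) sv) := by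
        simp [pvSieveStep, h]
      rw [hstep]
      obtain ⟨t, ht, heq⟩ := ih (pr ++ [i])
        ((PySem.List.pyRange (i*i) (x+1) i).foldl (fun sv j => sv.set! j.toNat false) sv)
      exact ⟨i :: t, ht.cons₂ i, by rw [heq]; simp⟩
    · have hstep : pvSieveStep x (pr, sv) i = (pr, sv) := by
        simp [pvSieveStep, h]
      rw [hstep]
      obtain ⟨t, ht, heq⟩ := ih pr sv
      exact ⟨t, ht.cons i, heq⟩

lemma pvPrimes_sublist (x : Int) : (pvPrimes x).Sublist (PySem.List.pyRange 2 (x+1) 1) := by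
  obtain ⟨t, ht, heq⟩ := pvSieve_fold_fst x (PySem.List.pyRange 2 (x+1) 1) []
    (((Array.replicate (x+1).toNat true).set! 0 false).set! 1 false)
  unfold pvPrimes
  rw [heq]; simpa using ht

lemma pvPrimes_pairwise (x : Int) : (pvPrimes x).Pairwise (· < ·) :=
  (PySem.List.pairwise_lt_pyRange_one 2 (x+1)).sublist (pvPrimes_sublist x)

lemma pvPrimes_mem (x : Int) {p : Int} (h : p ∈ pvPrimes x) : 2 ≤ p ∧ p < x + 1 :=
  (PySem.List.mem_pyRange_one).1 ((pvPrimes_sublist x).mem h)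

-- d-loop: finds d = x-a-b-c iff it is in the (sorted) prime list
lemma pvLoopD_eq (x a b c : Int) : ∀ (Q : List Int), Q.Pairwise (· < ·) →
    pvLoopD x a b c Q =
      if (x - a - b - c) ∈ Q then some (pvFmt a b c (x - a - b - c)) else none := by
  intro Q
  induction Q with
  | nil => intro _; simp [pvLoopD]
  | cons d ds ih =>
    intro hpw
    have hlt : ∀ e ∈ ds, d < e := fun e he => (List.pairwise_cons.1 hpw).1 e he
    have hpw' := (List.pairwise_cons.1 hpw).2
    unfold pvLoopD
    by_cases h1 : a + b + c + d > x
    · have hne : (x - a - b - c) ∉ d :: ds := by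
        intro hmem
        rcases List.mem_cons.1 hmem with h | h
        · omega
        · have := hlt _ h; omega
      simp [h1, hne]
    · by_cases h2 : a + b + c + d = x
      · have hd : d = x - a - b - c := by omega
        have hmem : (x - a - b - c) ∈ d :: ds := by rw [← hd]; exact List.mem_cons_self
        simp [h2, ← hd]
      · have hne : x - a - b - c ≠ d := by omega
        simp only [h1, if_false, h2]
        rw [ih hpw']
        simp [List.mem_cons, hne]

-- c-loop = pvFirstC
lemma pvLoopC_eq (x a b : Int) (P : List Int) (hP : P.Pairwise (· < ·)) :
    ∀ (Q : List Int), pvLoopC x a b P Q =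
      match pvFirstC (x - a - b) P Q with
      | some c => some (pvFmt a b c (x - a - b - c))
      | none => none := by
  intro Q
  induction Q with
  | nil => rfl
  | cons c cs ih =>
    unfold pvLoopC pvFirstC
    rw [pvLoopD_eq x a b c P hP]
    by_cases h : (x - a - b - c) ∈ P
    · simp [h]
    · simp [h, ih]

lemma pvFirstC_none (v : Int) (P : List Int) :
    ∀ (Q : List Int), (∀ c ∈ Q, (v - c) ∉ P) → pvFirstC v P Q = none := by
  intro Q
  induction Q with
  | nil => intro _; rfl
  | cons c cs ih =>
    intro h
    unfold pvFirstC
    simp only [h c List.mem_cons_self, if_false]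
    exact ih (fun c' hc' => h c' (List.mem_cons_of_mem _ hc'))

lemma pvFirstC_none_of_lt4 (v : Int) (P : List Int) (h2P : ∀ p ∈ P, 2 ≤ p) (hv : v < 4) :
    ∀ (Q : List Int), (∀ c ∈ Q, 2 ≤ c) → pvFirstC v P Q = none := by
  intro Q hQ
  apply pvFirstC_none
  intro c hc hmem
  have := h2P _ hmem
  have := hQ _ hc
  omega

lemma pvLoopB_none (x a : Int) (P : List Int) (hP : P.Pairwise (· < ·)) (h2P : ∀ p ∈ P, 2 ≤ p) :
    ∀ (Q : List Int), (∀ b ∈ Q, 2 ≤ b ∧ x - a - b < 4) → pvLoopB x a P Q = none := by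
  intro Q
  induction Q with
  | nil => intro _; rfl
  | cons b bs ih =>
    intro h
    unfold pvLoopB
    rw [pvLoopC_eq x a b P hP]
    rw [pvFirstC_none_of_lt4 (x - a - b) P h2P (h b List.mem_cons_self).2 P h2P]
    exact ih (fun b' hb' => h b' (List.mem_cons_of_mem _ hb'))

-- a successful pvGenLoop picks its head from a successful recursive call
lemma pvGenLoop_some (f : Int → Option (List Int)) (bound : Int) :
    ∀ (Q : List Int) (g : List Int), pvGenLoop f bound Q = some g →
      ∃ p rest, g = p :: rest ∧ f p = some rest := by
  intro Q
  induction Q with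
  | nil => intro g h; exact absurd h (by simp [pvGenLoop])
  | cons p ps ih =>
    intro g h
    unfold pvGenLoop at h
    by_cases hb : p > bound
    · rw [if_pos hb] at h; exact absurd h (by simp)
    · rw [if_neg hb] at h
      cases hf : f p with
      | some rest => rw [hf] at h; exact ⟨p, rest, (Option.some.inj h).symm, hf⟩
      | none => rw [hf] at h; exact ih g h

-- pvGen returns j picks when it succeeds
lemma pvGen_length (P : List Int) (pset : PySem.Set Int) :
    ∀ (j : Nat) (rem : Int) (g : List Int), pvGen P pset j rem = some g → g.length = j := by
  intro j
  induction j with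
  | zero => intro rem g h; exact absurd h (by simp [pvGen])
  | succ j ih =>
    intro rem g h
    match j with
    | 0 =>
      unfold pvGen at h
      by_cases hm : rem ∈ pset
      · rw [if_pos hm] at h; simp [← Option.some.inj h]
      · rw [if_neg hm] at h; exact absurd h (by simp)
    | j' + 1 =>
      unfold pvGen at h
      obtain ⟨p, rest, rfl, hf⟩ := pvGenLoop_some _ _ P g h
      simp [ih _ rest hf]

-- level 2: the last two slots — gen(2, rem) = first c with rem - c prime, paired with rem - c
lemma pvGen_two (P : List Int) (hP : P.Pairwise (· < ·)) (h2P : ∀ p ∈ P, 2 ≤ p) (rem : Int) :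
    pvGen P (PySem.Set.ofList P) 2 rem =
      match pvFirstC rem P P with
      | some c => some [c, rem - c]
      | none => none := by
  show pvGenLoop _ _ P = _
  have main : ∀ (Q : List Int), Q.Pairwise (· < ·) →
      pvGenLoop (fun p => pvGen P (PySem.Set.ofList P) 1 (rem - p)) (rem - 2 * ((0:Int) + 1)) Q =
        match pvFirstC rem P Q with
        | some c => some [c, rem - c]
        | none => none := by
    intro Q
    induction Q with
    | nil => intro _; rfl
    | cons c cs ih =>
      intro hpw
      have hlt : ∀ e ∈ cs, c < e := fun e he => (List.pairwise_cons.1 hpw).1 e he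
      have hpw' := (List.pairwise_cons.1 hpw).2
      unfold pvGenLoop pvFirstC
      by_cases hb : c > rem - 2 * ((0:Int) + 1)
      · have h1 : (rem - c) ∉ P := fun hmem => by have := h2P _ hmem; omega
        rw [if_pos hb]
        simp only [h1, if_false]
        rw [pvFirstC_none rem P cs (fun c' hc' hmem => by
          have := hlt _ hc'; have := h2P _ hmem; omega)]
      · rw [if_neg hb]
        have h1 : pvGen P (PySem.Set.ofList P) 1 (rem - c) =
            if (rem - c) ∈ P then some [rem - c] else none := by
          simp [pvGen, PySem.Set.mem_ofList]
        rw [h1]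
        by_cases hm : (rem - c) ∈ P
        · rw [if_pos hm, if_pos hm]
        · rw [if_neg hm, if_neg hm]
          exact ih hpw' 
  exact main P hP

-- level 3: A's b-loop (no break) agrees with gen(3, x-a) (with its pruning break)
lemma pvGen_three (x a : Int) (P : List Int) (hP : P.Pairwise (· < ·))
    (h2P : ∀ p ∈ P, 2 ≤ p) :
    ∀ (Q : List Int), Q.Pairwise (· < ·) → (∀ b ∈ Q, 2 ≤ b) →
      pvLoopB x a P Q =
        (pvGenLoop (fun p => pvGen P (PySem.Set.ofList P) 2 (x - a - p))
            (x - a - 2 * ((1:Int) + 1)) Q).map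
          (fun g => pvFmt a g.headI g.tail.headI g.tail.tail.headI) := by
  intro Q
  induction Q with
  | nil => intro _ _; rfl
  | cons b bs ih =>
    intro hpw hb2
    have hlt : ∀ e ∈ bs, b < e := fun e he => (List.pairwise_cons.1 hpw).1 e he
    have hpw' := (List.pairwise_cons.1 hpw).2
    unfold pvLoopB pvGenLoop
    rw [pvLoopC_eq x a b P hP]
    by_cases hbr : b > x - a - 2 * ((1:Int) + 1)
    · rw [if_pos hbr]
      rw [pvFirstC_none_of_lt4 (x - a - b) P h2P (by omega) P h2P]
      simp only [Option.map_none]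
      apply pvLoopB_none x a P hP h2P
      intro b' hb'
      have := hlt b' hb'
      exact ⟨hb2 b' (List.mem_cons_of_mem _ hb'), by omega⟩
    · rw [if_neg hbr]
      rw [pvGen_two P hP h2P (x - a - b)]
      cases hfc : pvFirstC (x - a - b) P P with
      | some c => simp
      | none => exact ih hpw' (fun b' hb' => hb2 b' (List.mem_cons_of_mem _ hb'))

-- level 4: A's a-loop agrees with gen(4, x)
lemma pvGen_four (x : Int) (P : List Int) (hP : P.Pairwise (· < ·))
    (h2P : ∀ p ∈ P, 2 ≤ p) :
    ∀ (Q : List Int), Q.Pairwise (· < ·) → (∀ a ∈ Q, 2 ≤ a) →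
      pvLoopA x P Q =
        (pvGenLoop (fun p => pvGen P (PySem.Set.ofList P) 3 (x - p))
            (x - 2 * ((2:Int) + 1)) Q).map
          (fun g => pvFmt g.headI g.tail.headI g.tail.tail.headI g.tail.tail.tail.headI) := by
  intro Q
  induction Q with
  | nil => intro _ _; rfl
  | cons a as_ ih =>
    intro hpw ha2
    have hlt : ∀ e ∈ as_, a < e := fun e he => (List.pairwise_cons.1 hpw).1 e he
    have hpw' := (List.pairwise_cons.1 hpw).2
    have hnone : ∀ a' : Int, x - a' < 6 → pvLoopB x a' P P = none := by
      intro a' h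
      apply pvLoopB_none x a' P hP h2P
      intro b hb
      exact ⟨h2P b hb, by have := h2P b hb; omega⟩
    unfold pvLoopA pvGenLoop
    by_cases hbr : a > x - 2 * ((2:Int) + 1)
    · rw [if_pos hbr]
      simp only [Option.map_none]
      rw [hnone a (by omega)]
      have hall : ∀ (R : List Int), (∀ a' ∈ R, a < a') → pvLoopA x P R = none := by
        intro R
        induction R with
        | nil => intro _; rfl
        | cons a' R' ihR =>
          intro hR
          unfold pvLoopA
          rw [hnone a' (by have := hR a' List.mem_cons_self; omega)]
          exact ihR (fun a'' h'' => hR a'' (List.mem_cons_of_mem _ h''))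
      exact hall as_ hlt
    · rw [if_neg hbr]
      have h3 : pvGen P (PySem.Set.ofList P) 3 (x - a) =
          pvGenLoop (fun p => pvGen P (PySem.Set.ofList P) 2 (x - a - p))
            (x - a - 2 * ((1:Int) + 1)) P := rfl
      rw [pvGen_three x a P hP h2P P hP h2P, h3]
      cases pvGenLoop (fun p => pvGen P (PySem.Set.ofList P) 2 (x - a - p))
          (x - a - 2 * ((1:Int) + 1)) P with
      | some g => simp
      | none => exact ih hpw' (fun a' ha' => ha2 a' (List.mem_cons_of_mem _ ha'))

-- " ".join(map(str, [a,b,c,d])) is the f-string f"{a} {b} {c} {d}"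
lemma pvJoin_four (a b c d : Int) :
    PySem.Str.join " " ([a, b, c, d].map PySem.Int.toStr) = pvFmt a b c d := by
  apply String.ext
  simp [PySem.Str.join, pvFmt, PySem.Int.toStr, PySem.Chars.join, List.intercalate,
    List.intersperse]

-- ===== VERDICT (by name: the statement is the Claim_ definition above) =====
theorem func_spec : Claim_equal_func := by
  intro x _
  unfold Spec_func func func_alt
  by_cases hx : x < 8
  · simp [hx]
  · simp only [hx, if_false]
    have hP := pvPrimes_pairwise x
    have h2P : ∀ p ∈ pvPrimes x, 2 ≤ p := fun p hp => (pvPrimes_mem x hp).1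
    have h4 : pvGen (pvPrimes x) (PySem.Set.ofList (pvPrimes x)) 4 x =
        pvGenLoop (fun p => pvGen (pvPrimes x) (PySem.Set.ofList (pvPrimes x)) 3 (x - p))
          (x - 2 * ((2:Int) + 1)) (pvPrimes x) := rfl
    rw [pvGen_four x (pvPrimes x) hP h2P (pvPrimes x) hP h2P, ← h4]
    cases hg : pvGen (pvPrimes x) (PySem.Set.ofList (pvPrimes x)) 4 x with
    | none => rfl
    | some g =>
      have hlen := pvGen_length (pvPrimes x) (PySem.Set.ofList (pvPrimes x)) 4 x g hg
      match g, hlen with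
      | [a, b, c, d], _ => exact (pvJoin_four a b c d).symm
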